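-- pv_equiv track=rewrite | github.com/vanHavel/AdventOfCode2023 | days/day13.py | part2
-- ===== SOURCE A (Python) =====
-- import copy
--
-- def part2(data: str) -> str:
--     grids = data.split("\n\n")
--     ans = 0
--     for sgrid in grids:
--         grid = sgrid.splitlines()
--         normal = [c for c in find(grid)][0]
--         n = len(grid)
--         m = len(grid[0])
--         for si in range(n):
--             for sj in range(m):
--                 sgrid = copy.deepcopy(grid)
--                 if sgrid[si][sj] == ".":
--                     sgrid[si] = sgrid[si][:sj] + "#" + sgrid[si][sj+1:]
--                 else:
--                     sgrid[si] = sgrid[si][:sj] + "." + sgrid[si][sj + 1:]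
--                 for t in find(sgrid):
--                     if t != normal:
--                         factor = 1 if t[1] == "v" else 100
--                         ans += factor * t[0]
--     return str(ans // 2)
--
-- def find(grid):
--     n = len(grid)
--     m = len(grid[0])
--     # cols
--     for i in range(1, m):
--         ok = True
--         for j in range(m):
--             if i - j - 1 < 0:
--                 continue
--             if i + j >= m:
--                 continue
--             for k in range(n):
--                 if grid[k][i - j - 1] != grid[k][i + j]:
--                     ok = False
--                     break
--             if not ok:
--                 break
--         if ok:
--             yield (i, "v")
--     # rows
--     for i in range(1, n):
--         ok = True
--         for j in range(n):
--             if i - j - 1 < 0: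
--                 continue
--             if i + j >= n:
--                 continue
--             for k in range(m):
--                 if grid[i + j][k] != grid[i - j - 1][k]:
--                     ok = False
--                     break
--             if not ok:
--                 break
--         if ok:
--             yield (i, "h")
-- ===== SOURCE B (Python) =====
-- def part2(data: str) -> str:
--     total = 0
--     for block in data.split("\n\n"):
--         g = block.splitlines()
--         n = len(g)
--         m = len(g[0])
--         # mismatched mirrored pairs of every candidate line, computed once per grid
--         vbad = {i: [(j, k) for j in range(min(i, m - i)) for k in range(n)
--                     if g[k][i - 1 - j] != g[k][i + j]] for i in range(1, m)}
--         hbad = {i: [(j, k) for j in range(min(i, n - i)) for k in range(m)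
--                     if g[i - 1 - j][k] != g[i + j][k]] for i in range(1, n)}
--         lines = [(i, "v") for i in range(1, m) if not vbad[i]] \
--             + [(i, "h") for i in range(1, n) if not hbad[i]]
--         normal = lines[0]  # the grid's own reflection line
--         for si in range(n):
--             for sj in range(m):
--                 c = g[si][sj]
--                 fc = "#" if c == "." else "."
--                 # does flipping cell (si, sj) leave/make line i a mirror?
--                 for i in range(1, m):
--                     w = min(i, m - i)
--                     if i - w <= sj < i + w:
--                         # the flip lands on one mirrored pair of the line: the line
--                         # reflects iff that pair was its only mismatch and is now fixed
--                         if sj < i: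
--                             j = i - 1 - sj
--                             ok = vbad[i] == [(j, si)] and fc == g[si][i + j]
--                         else:
--                             j = sj - i
--                             ok = vbad[i] == [(j, si)] and g[si][i - 1 - j] == fc
--                     else:
--                         ok = not vbad[i]
--                     if ok and (i, "v") != normal:
--                         total += i
--                 for i in range(1, n):
--                     w = min(i, n - i)
--                     if i - w <= si < i + w:
--                         if si < i:
--                             j = i - 1 - si
--                             ok = hbad[i] == [(j, sj)] and fc == g[i + j][sj]
--                         else:
--                             j = si - i
--                             ok = hbad[i] == [(j, sj)] and g[i - 1 - j][sj] == fc
--                     else: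
--                         ok = not hbad[i]
--                     if ok and (i, "h") != normal:
--                         total += 100 * i
--     return str(total // 2)
-- ===== Notes on version B (the rewrite author's own statement) =====
-- stated objective: faster
-- what changed: A rebuilds the grid and reruns the full mirror search for every single-cell flip; B precomputes each candidate line's mismatched mirror pairs once per grid and decides per flip in O(1) per line whether the line reflects (the flip must fix the line's only mismatch, or the line was perfect and the flip lands outside its mirrored span). Pre_ excludes only the inputs on which A raises IndexError: an empty grid block, a row shorter than the first row, or a block with no perfect reflection line.
import Mathlib
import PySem

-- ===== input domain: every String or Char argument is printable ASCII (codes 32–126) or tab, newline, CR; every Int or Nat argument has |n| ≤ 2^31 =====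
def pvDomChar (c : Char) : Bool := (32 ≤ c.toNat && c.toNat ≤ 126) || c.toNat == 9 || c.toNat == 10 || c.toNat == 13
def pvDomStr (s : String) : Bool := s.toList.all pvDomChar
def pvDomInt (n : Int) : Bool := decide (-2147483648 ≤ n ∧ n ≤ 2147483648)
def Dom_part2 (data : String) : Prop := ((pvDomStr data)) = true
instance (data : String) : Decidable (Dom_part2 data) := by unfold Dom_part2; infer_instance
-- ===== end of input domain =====

-- B precomputes each candidate reflection line's mismatched mirror pairs once per grid and
-- decides per cell flip in O(1) per line whether it reflects, instead of A's full re-search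
-- of every flipped grid.

-- ===== PORT A =====
-- grid[k][j]; reads are exact when in range (guaranteed by the loop guards and Pre_)
def pvCell (g : List (List Char)) (k j : Nat) : Char := (g.getD k []).getD j ' '

-- the 'ok' scan for a vertical mirror at column i (cols block of find); breaks dropped: all-of
def pvOkV (g : List (List Char)) (n m i : Nat) : Bool :=
  (List.range m).all fun j =>
    if i < j + 1 then true            -- i - j - 1 < 0: continue
    else if m ≤ i + j then true       -- i + j >= m: continue
    else (List.range n).all fun k => pvCell g k (i - j - 1) == pvCell g k (i + j)

-- the 'ok' scan for a horizontal mirror at row i (rows block of find)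
def pvOkH (g : List (List Char)) (n m i : Nat) : Bool :=
  (List.range n).all fun j =>
    if i < j + 1 then true
    else if n ≤ i + j then true
    else (List.range m).all fun k => pvCell g (i + j) k == pvCell g (i - j - 1) k

-- find(grid): the yielded (i, "v") / (i, "h") pairs in order; true = "v", false = "h"
def pvFind (g : List (List Char)) : List (Nat × Bool) :=
  ((List.range' 1 ((g.headD []).length - 1)).filter
      (fun i => pvOkV g g.length (g.headD []).length i)).map (fun i => (i, true))
    ++ ((List.range' 1 (g.length - 1)).filter
      (fun i => pvOkH g g.length (g.headD []).length i)).map (fun i => (i, false))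

def pvFlipChar (c : Char) : Char := if c == '.' then '#' else '.'

-- sgrid = deepcopy(grid); sgrid[si] = sgrid[si][:sj] + flipped + sgrid[si][sj+1:]
def pvFlipAt (g : List (List Char)) (si sj : Nat) : List (List Char) :=
  g.set si ((g.getD si []).take sj ++ [pvFlipChar ((g.getD si []).getD sj ' ')]
             ++ (g.getD si []).drop (sj + 1))

def pvGridOf (s : String) : List (List Char) := (PySem.Str.splitlines s).map String.toList

-- the body of A's outer loop for one grid: all smudge positions, all new reflections
def pvGridSum (g : List (List Char)) : Int :=
  let normal := (pvFind g).headD (0, true)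
  (List.range g.length).foldl (fun ans si =>
    (List.range (g.headD []).length).foldl (fun ans sj =>
      (pvFind (pvFlipAt g si sj)).foldl (fun ans t =>
        if t ≠ normal then ans + (if t.2 then 1 else 100) * (t.1 : Int) else ans) ans) ans) 0

def part2 (data : String) : String :=
  PySem.Int.toStr (PySem.Int.floordiv
    (((PySem.Str.split? data "\n\n").getD []).foldl
      (fun ans sg => ans + pvGridSum (pvGridOf sg)) 0) 2)

-- ===== PORT B =====
-- the mismatched mirrored cell positions of candidate line i over the cell function f
-- (B's vbad/hbad comprehensions; for a horizontal line f is the transposed cell access)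
def badA (f : Nat → Nat → Char) (w n i : Nat) : List (Nat × Nat) :=
  (List.range w).flatMap fun j =>
    (List.range n).filterMap fun k =>
      if f k (i - 1 - j) ≠ f k (i + j) then some (j, k) else none

-- B's per-grid total: per flip, an O(1) test per line against its precomputed mismatches
def pvAltGrid (g : List (List Char)) : Int :=
  let n := g.length
  let m := (g.headD []).length
  let vbad := fun i => badA (pvCell g) (min i (m - i)) n i
  let hbad := fun i => badA (fun k j => pvCell g j k) (min i (n - i)) m i
  let lines := ((List.range' 1 (m - 1)).filter (fun i => vbad i == [])).map (fun i => (i, true))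
      ++ ((List.range' 1 (n - 1)).filter (fun i => hbad i == [])).map (fun i => (i, false))
  let normal : Nat × Bool := lines.headD (0, true)
  (List.range n).foldl (fun total si =>
    (List.range m).foldl (fun total sj =>
      let fc := pvFlipChar (pvCell g si sj)
      let total := (List.range' 1 (m - 1)).foldl (fun total i =>
        let w := min i (m - i)
        let ok : Bool :=
          if i - w ≤ sj ∧ sj < i + w then
            if sj < i then
              vbad i == [(i - 1 - sj, si)] && fc == pvCell g si (i + (i - 1 - sj))
            else
              vbad i == [(sj - i, si)] && pvCell g si (i - 1 - (sj - i)) == fc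
          else vbad i == []
        if ok ∧ ((i, true) : Nat × Bool) ≠ normal then total + (i : Int) else total) total
      (List.range' 1 (n - 1)).foldl (fun total i =>
        let w := min i (n - i)
        let ok : Bool :=
          if i - w ≤ si ∧ si < i + w then
            if si < i then
              hbad i == [(i - 1 - si, sj)] && fc == pvCell g (i + (i - 1 - si)) sj
            else
              hbad i == [(si - i, sj)] && pvCell g (i - 1 - (si - i)) sj == fc
          else hbad i == []
        if ok ∧ ((i, false) : Nat × Bool) ≠ normal then total + 100 * (i : Int) else total)
        total) total) 0

def part2_alt (data : String) : String :=
  PySem.Int.toStr (PySem.Int.floordiv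
    (((PySem.Str.split? data "\n\n").getD []).foldl
      (fun total sg => total + pvAltGrid (pvGridOf sg)) 0) 2)

-- ===== PRECONDITION & SPEC =====
-- some candidate line is a perfect mirror: what A's find must yield at least once
def pvHasRefl (g : List (List Char)) : Prop :=
  (∃ i < (g.headD []).length, 0 < i ∧ pvOkV g g.length (g.headD []).length i = true)
    ∨ (∃ i < g.length, 0 < i ∧ pvOkH g g.length (g.headD []).length i = true)

-- exactly A's return domain: A raises IndexError when a grid block is empty, when a row is
-- shorter than the first row (the smudge loop indexes every row at all columns < len(grid[0])),
-- or when a grid has no reflection (find(grid) yields nothing and [...][0] fails).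
def Pre_part2 (data : String) : Prop :=
  ∀ s ∈ (PySem.Str.split? data "\n\n").getD [],
    pvGridOf s ≠ [] ∧
    (∀ r ∈ pvGridOf s, ((pvGridOf s).headD []).length ≤ r.length) ∧
    pvHasRefl (pvGridOf s)

instance (data : String) : Decidable (Pre_part2 data) := by
  unfold Pre_part2 pvHasRefl; infer_instance

def pvWitness_part2 : String := "#.\n#."

def Spec_part2 (data : String) (out : String) : Prop := out = part2_alt data
instance (data : String) (out : String) : Decidable (Spec_part2 data out) := by
  unfold Spec_part2; infer_instance

-- ===== CLAIM (what is proved, stated in full; the proofs are below) =====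
def Claim_equal_part2 : Prop :=
  ∀ (data : String), Dom_part2 data → Pre_part2 data → Spec_part2 data (part2 data)

-- ===== LEMMAS AND PROOFS =====

-- abstract cell-function layer used by the proofs: f k j = cell at row k, column j
def updF (f : Nat → Nat → Char) (si sj : Nat) (v : Char) : Nat → Nat → Char :=
  fun k j => if k = si ∧ j = sj then v else f k j

-- the vertical-mirror condition at line i with half-width w over n rows
def okA (f : Nat → Nat → Char) (w n i : Nat) : Prop :=
  ∀ j < w, ∀ k < n, f k (i - 1 - j) = f k (i + j)

theorem mem_badA {f w n i} {p : Nat × Nat} :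
    p ∈ badA f w n i ↔ p.1 < w ∧ p.2 < n ∧ f p.2 (i - 1 - p.1) ≠ f p.2 (i + p.1) := by
  obtain ⟨a, b⟩ := p
  simp only [badA, List.mem_flatMap, List.mem_filterMap, List.mem_range,
    Option.ite_none_right_eq_some, Option.some.injEq, Prod.mk.injEq]
  constructor
  · rintro ⟨j, hj, k, hk, hne, rfl, rfl⟩; exact ⟨hj, hk, hne⟩
  · rintro ⟨ha, hb, hne⟩; exact ⟨a, ha, b, hb, hne, rfl, rfl⟩

theorem badA_nil_iff {f w n i} : badA f w n i = [] ↔ okA f w n i := by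
  rw [List.eq_nil_iff_forall_not_mem]
  constructor
  · intro h j hj k hk
    by_contra hne
    exact h (j, k) (mem_badA.2 ⟨hj, hk, hne⟩)
  · intro h p hp
    obtain ⟨h1, h2, h3⟩ := mem_badA.1 hp
    exact h3 (h p.1 h1 p.2 h2)

theorem nodup_badA (f : Nat → Nat → Char) (w n i : Nat) : (badA f w n i).Nodup := by
  induction w with
  | zero => simp [badA]
  | succ w ih =>
      unfold badA
      rw [List.range_succ, List.flatMap_append, List.flatMap_cons, List.flatMap_nil,
        List.append_nil]
      refine List.Nodup.append (by unfold badA at ih; exact ih) ?_ ?_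
      · refine List.Nodup.filterMap ?_ List.nodup_range
        intro a a' b h1 h2
        simp only [Option.mem_def, Option.ite_none_right_eq_some, Option.some.injEq] at h1 h2
        rw [← h2.2] at h1
        exact (Prod.mk.injEq _ _ _ _ ▸ h1.2).2
      · intro p hpL hpR
        have hL : p ∈ badA f w n i := by unfold badA; exact hpL
        have h1 := (mem_badA.1 hL).1
        simp only [List.mem_filterMap, Option.ite_none_right_eq_some,
          Option.some.injEq] at hpR
        obtain ⟨k, -, -, hk⟩ := hpR
        rw [← hk] at h1
        omega

theorem eq_singleton_of_mem {α : Type} {l : List α} {p : α} (hnd : l.Nodup)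
    (hp : p ∈ l) (hall : ∀ x ∈ l, x = p) : l = [p] := by
  cases l with
  | nil => cases hp
  | cons a t =>
      have ha : a = p := hall a (List.mem_cons_self ..)
      subst ha
      cases t with
      | nil => rfl
      | cons b t' =>
          have hb : b = a := hall b (by simp)
          exact absurd (hb ▸ (List.mem_cons_self ..)) (List.nodup_cons.1 hnd).1

theorem pvFlipChar_ne (c : Char) : pvFlipChar c ≠ c := by
  unfold pvFlipChar
  by_cases h : c == '.'
  · rw [eq_of_beq h]; decide
  · simp only [h, Bool.false_eq_true, if_false]
    intro hc
    subst hc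
    simp at h

theorem upd_out {f : Nat → Nat → Char} {w n m i si sj : Nat} {v : Char}
    (hw : w = min i (m - i)) (h2 : i < m) (hsj : sj < i - w ∨ i + w ≤ sj) :
    okA (updF f si sj v) w n i ↔ okA f w n i := by
  unfold okA updF
  refine forall₂_congr fun j hj => forall₂_congr fun k hk => ?_
  rw [if_neg (by omega), if_neg (by omega)]

theorem upd_L {f : Nat → Nat → Char} {w n m i si sj : Nat} {v : Char}
    (hw : w = min i (m - i)) (h2 : i < m) (hsi : si < n)
    (hsj1 : i - w ≤ sj) (hsj2 : sj < i) :
    okA (updF f si sj v) w n i ↔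
      ((∀ j < w, ∀ k < n, (j, k) ≠ (i - 1 - sj, si) → f k (i - 1 - j) = f k (i + j))
        ∧ v = f si (i + (i - 1 - sj))) := by
  have hjL : i - 1 - sj < w := by omega
  constructor
  · intro h
    constructor
    · intro j hj k hk hne
      have := h j hj k hk
      unfold updF at this
      rwa [if_neg (by rintro ⟨rfl, rfl⟩; exact hne (Prod.ext (by omega) rfl)),
           if_neg (by omega)] at this
    · have := h (i - 1 - sj) hjL si hsi
      unfold updF at this
      rwa [if_pos (by constructor <;> omega), if_neg (by omega)] at this
  · rintro ⟨hothers, hv⟩ j hj k hk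
    unfold updF
    by_cases hme : j = i - 1 - sj ∧ k = si
    · obtain ⟨rfl, rfl⟩ := hme
      rw [if_pos (by constructor <;> omega), if_neg (by omega)]
      exact hv
    · rw [if_neg (by rintro ⟨rfl, rfl⟩; exact hme ⟨by omega, rfl⟩),
          if_neg (by omega)]
      exact hothers j hj k hk (by simp only [ne_eq, Prod.mk.injEq, not_and]; intro hji; omega)

theorem upd_R {f : Nat → Nat → Char} {w n m i si sj : Nat} {v : Char}
    (hw : w = min i (m - i)) (h2 : i < m) (hsi : si < n)
    (hsj1 : i ≤ sj) (hsj2 : sj < i + w) :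
    okA (updF f si sj v) w n i ↔
      ((∀ j < w, ∀ k < n, (j, k) ≠ (sj - i, si) → f k (i - 1 - j) = f k (i + j))
        ∧ f si (i - 1 - (sj - i)) = v) := by
  have hjR : sj - i < w := by omega
  constructor
  · intro h
    constructor
    · intro j hj k hk hne
      have := h j hj k hk
      unfold updF at this
      rwa [if_neg (by omega),
           if_neg (by rintro ⟨rfl, rfl⟩; exact hne (Prod.ext (by omega) rfl))] at this
    · have := h (sj - i) hjR si hsi
      unfold updF at this
      rwa [if_neg (by omega), if_pos (by constructor <;> omega)] at this
  · rintro ⟨hothers, hv⟩ j hj k hk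
    unfold updF
    by_cases hme : j = sj - i ∧ k = si
    · obtain ⟨rfl, rfl⟩ := hme
      rw [if_neg (by omega), if_pos (by constructor <;> omega)]
      exact hv
    · rw [if_neg (by omega),
          if_neg (by rintro ⟨rfl, rfl⟩; exact hme ⟨by omega, rfl⟩)]
      exact hothers j hj k hk (by simp only [ne_eq, Prod.mk.injEq, not_and]; intro hji; omega)

-- B's O(1) per-line test equals "line i still mirrors after flipping cell (si, sj)"
theorem condA_iff (f : Nat → Nat → Char) (n m i si sj : Nat)
    (h1 : 0 < i) (h2 : i < m) (hsi : si < n) :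
    ((if i - min i (m - i) ≤ sj ∧ sj < i + min i (m - i) then
        if sj < i then
          badA f (min i (m - i)) n i == [(i - 1 - sj, si)]
            && pvFlipChar (f si sj) == f si (i + (i - 1 - sj))
        else
          badA f (min i (m - i)) n i == [(sj - i, si)]
            && f si (i - 1 - (sj - i)) == pvFlipChar (f si sj)
      else badA f (min i (m - i)) n i == ([] : List (Nat × Nat))) = true)
      ↔ okA (updF f si sj (pvFlipChar (f si sj))) (min i (m - i)) n i := by
  by_cases hspan : i - min i (m - i) ≤ sj ∧ sj < i + min i (m - i)
  · rw [if_pos hspan]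
    by_cases hlt : sj < i
    · rw [if_pos hlt, Bool.and_eq_true, beq_iff_eq, beq_iff_eq,
        upd_L (f := f) (n := n) rfl h2 hsi hspan.1 hlt]
      have hcell : f si (i - 1 - (i - 1 - sj)) = f si sj := by
        congr 1
        omega
      constructor
      · rintro ⟨hbad, hv⟩
        refine ⟨?_, hv⟩
        intro j hj k hk hne
        by_contra hmis
        have : ((j, k) : Nat × Nat) ∈ badA f (min i (m - i)) n i :=
          mem_badA.2 ⟨hj, hk, hmis⟩
        rw [hbad] at this
        exact hne (List.mem_singleton.1 this)
      · rintro ⟨hoth, hv⟩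
        refine ⟨?_, hv⟩
        have hmem : ((i - 1 - sj, si) : Nat × Nat) ∈ badA f (min i (m - i)) n i := by
          refine mem_badA.2 ⟨by omega, hsi, ?_⟩
          show f si (i - 1 - (i - 1 - sj)) ≠ f si (i + (i - 1 - sj))
          rw [hcell, ← hv]
          exact fun h => pvFlipChar_ne (f si sj) h.symm
        refine eq_singleton_of_mem (nodup_badA ..) hmem (fun x hx => ?_)
        by_contra hxne
        obtain ⟨hx1, hx2, hx3⟩ := mem_badA.1 hx
        exact hx3 (hoth x.1 hx1 x.2 hx2 (fun h => hxne (by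
          obtain ⟨a, b⟩ := x
          exact h)))
    · rw [if_neg hlt, Bool.and_eq_true, beq_iff_eq, beq_iff_eq,
        upd_R (f := f) (n := n) rfl h2 hsi (by omega) hspan.2]
      have hcell : f si (i + (sj - i)) = f si sj := by
        congr 1
        omega
      constructor
      · rintro ⟨hbad, hv⟩
        refine ⟨?_, hv⟩
        intro j hj k hk hne
        by_contra hmis
        have : ((j, k) : Nat × Nat) ∈ badA f (min i (m - i)) n i :=
          mem_badA.2 ⟨hj, hk, hmis⟩
        rw [hbad] at this
        exact hne (List.mem_singleton.1 this)
      · rintro ⟨hoth, hv⟩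
        refine ⟨?_, hv⟩
        have hmem : ((sj - i, si) : Nat × Nat) ∈ badA f (min i (m - i)) n i := by
          refine mem_badA.2 ⟨by omega, hsi, ?_⟩
          show f si (i - 1 - (sj - i)) ≠ f si (i + (sj - i))
          rw [hcell, hv]
          exact fun h => pvFlipChar_ne (f si sj) h
        refine eq_singleton_of_mem (nodup_badA ..) hmem (fun x hx => ?_)
        by_contra hxne
        obtain ⟨hx1, hx2, hx3⟩ := mem_badA.1 hx
        exact hx3 (hoth x.1 hx1 x.2 hx2 (fun h => hxne (by
          obtain ⟨a, b⟩ := x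
          exact h)))
  · rw [if_neg hspan, beq_iff_eq,
      upd_out (f := f) (n := n) (v := pvFlipChar (f si sj)) rfl h2 (by omega)]
    exact badA_nil_iff

theorem sum_map_range_eq (n : Nat) (h : Nat → Int) :
    ((List.range n).map h).sum = ∑ x ∈ Finset.range n, h x := rfl

theorem sum_map_range'_eq (l : Nat) (h : Nat → Int) :
    ((List.range' 1 l).map h).sum = ∑ x ∈ Finset.Ico 1 (1 + l), h x := by
  rw [List.range'_eq_map_range, List.map_map, sum_map_range_eq,
    Finset.sum_Ico_eq_sum_range]
  simp

theorem sum_map_filter_eq {α : Type} (l : List α) (p : α → Bool) (h : α → Int) :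
    ((l.filter p).map h).sum = (l.map (fun x => if p x then h x else 0)).sum := by
  induction l with
  | nil => rfl
  | cons x t ih =>
      by_cases hx : p x
      · simp [hx, ih]
      · simp [hx, ih]

theorem foldl_add_ite {α : Type} (l : List α) (P : α → Prop) [DecidablePred P]
    (g : α → Int) (a : Int) :
    l.foldl (fun acc t => if P t then acc + g t else acc) a
      = a + (l.map (fun t => if P t then g t else 0)).sum := by
  induction l generalizing a with
  | nil => simp
  | cons x t ih =>
      by_cases hx : P x
      · simp [hx, ih, add_assoc]
      · simp [hx, ih]

-- cell function of the flipped grid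
theorem pvCell_flipAt (g : List (List Char)) (si sj : Nat)
    (hrow : sj < (g.getD si []).length) :
    pvCell (pvFlipAt g si sj) = updF (pvCell g) si sj (pvFlipChar (pvCell g si sj)) := by
  have hsi : si < g.length := by
    by_contra h
    rw [List.getD_eq_default _ _ (by omega)] at hrow
    simp at hrow
  funext k j
  unfold pvCell pvFlipAt updF
  rw [show (g.getD si []).take sj ++ [pvFlipChar ((g.getD si []).getD sj ' ')]
        ++ (g.getD si []).drop (sj+1)
      = (g.getD si []).set sj (pvFlipChar ((g.getD si []).getD sj ' ')) by
    rw [List.set_eq_take_cons_drop _ hrow]; simp]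
  simp only [List.getD_eq_getElem?_getD]
  rw [List.getElem?_set]
  by_cases hk : si = k
  · subst hk
    rw [if_pos rfl, if_pos hsi]
    simp only [Option.getD_some]
    rw [List.getElem?_set]
    by_cases hj : sj = j
    · subst hj
      rw [if_pos rfl]
      rw [List.getD_eq_getElem?_getD] at hrow
      rw [if_pos hrow]
      simp
    · rw [if_neg hj, if_neg (by rintro ⟨-, h⟩; exact hj h.symm)]
  · rw [if_neg hk, if_neg (by rintro ⟨h, -⟩; exact hk h.symm)]

theorem length_flipAt (g : List (List Char)) (si sj : Nat) :
    (pvFlipAt g si sj).length = g.length := by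
  unfold pvFlipAt; simp

theorem headD_length_flipAt (g : List (List Char)) (si sj : Nat)
    (hrow : sj < (g.getD si []).length) :
    ((pvFlipAt g si sj).headD []).length = (g.headD []).length := by
  have hsi : si < g.length := by
    by_contra h
    rw [List.getD_eq_default _ _ (by omega)] at hrow
    simp at hrow
  unfold pvFlipAt
  rw [show (g.getD si []).take sj ++ [pvFlipChar ((g.getD si []).getD sj ' ')]
        ++ (g.getD si []).drop (sj+1)
      = (g.getD si []).set sj (pvFlipChar ((g.getD si []).getD sj ' ')) by
    rw [List.set_eq_take_cons_drop _ hrow]; simp]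
  cases g with
  | nil => simp at hsi
  | cons r t =>
      cases si with
      | zero => simp
      | succ s => simp

theorem pvOkV_iff (g : List (List Char)) (n m i : Nat) (h1 : 0 < i) (h2 : i < m) :
    pvOkV g n m i = true ↔ okA (pvCell g) (min i (m - i)) n i := by
  have e : ∀ j : Nat, i - 1 - j = i - j - 1 := fun j => by omega
  unfold pvOkV okA
  simp only [List.all_eq_true, List.mem_range]
  constructor
  · intro h j hj k hk
    have := h j (by omega)
    rw [if_neg (by omega), if_neg (by omega)] at this
    simp only [List.all_eq_true, List.mem_range] at this
    rw [e]
    exact beq_iff_eq.1 (this k hk)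
  · intro h j hj
    by_cases c1 : i < j + 1
    · rw [if_pos c1]
    · rw [if_neg c1]
      by_cases c2 : m ≤ i + j
      · rw [if_pos c2]
      · rw [if_neg c2]
        simp only [List.all_eq_true, List.mem_range]
        intro k hk
        exact beq_iff_eq.2 (e j ▸ h j (by omega) k hk)

theorem pvOkH_iff (g : List (List Char)) (n m i : Nat) (h1 : 0 < i) (h2 : i < n) :
    pvOkH g n m i = true ↔ okA (fun k j => pvCell g j k) (min i (n - i)) m i := by
  have e : ∀ j : Nat, i - 1 - j = i - j - 1 := fun j => by omega
  unfold pvOkH okA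
  simp only [List.all_eq_true, List.mem_range]
  constructor
  · intro h j hj k hk
    have := h j (by omega)
    rw [if_neg (by omega), if_neg (by omega)] at this
    simp only [List.all_eq_true, List.mem_range] at this
    rw [e]
    exact (beq_iff_eq.1 (this k hk)).symm
  · intro h j hj
    by_cases c1 : i < j + 1
    · rw [if_pos c1]
    · rw [if_neg c1]
      by_cases c2 : n ≤ i + j
      · rw [if_pos c2]
      · rw [if_neg c2]
        simp only [List.all_eq_true, List.mem_range]
        intro k hk
        exact beq_iff_eq.2 (e j ▸ h j (by omega) k hk).symm

-- B's `lines` is exactly A's find(grid)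
theorem lines_eq_pvFind (g : List (List Char)) :
    ((List.range' 1 ((g.headD []).length - 1)).filter
        (fun i => badA (pvCell g) (min i ((g.headD []).length - i)) g.length i == [])).map
        (fun i => ((i, true) : Nat × Bool))
      ++ ((List.range' 1 (g.length - 1)).filter
        (fun i => badA (fun k j => pvCell g j k) (min i (g.length - i))
          (g.headD []).length i == [])).map (fun i => ((i, false) : Nat × Bool))
      = pvFind g := by
  unfold pvFind
  congr 1
  · congr 1
    refine List.filter_congr (fun i hi => ?_)
    rw [List.mem_range'_1] at hi
    rw [Bool.eq_iff_iff, beq_iff_eq, badA_nil_iff]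
    exact (pvOkV_iff g _ _ i (by omega) (by omega)).symm
  · congr 1
    refine List.filter_congr (fun i hi => ?_)
    rw [List.mem_range'_1] at hi
    rw [Bool.eq_iff_iff, beq_iff_eq, badA_nil_iff]
    exact (pvOkH_iff g _ _ i (by omega) (by omega)).symm

theorem updF_swap (f : Nat → Nat → Char) (a b : Nat) (v : Char) :
    (fun k j => updF f a b v j k) = updF (fun k j => f j k) b a v := by
  funext k j
  unfold updF
  exact if_congr and_comm rfl rfl

theorem findSum_eq (g : List (List Char)) (normal : Nat × Bool) (si sj : Nat) :
    ((pvFind (pvFlipAt g si sj)).map (fun t =>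
        if t ≠ normal then (if t.2 then 1 else 100) * (t.1 : Int) else 0)).sum
      = (∑ i ∈ Finset.Ico 1 (1 + (((pvFlipAt g si sj).headD []).length - 1)),
          if pvOkV (pvFlipAt g si sj) (pvFlipAt g si sj).length
              ((pvFlipAt g si sj).headD []).length i = true
          then (if ((i, true) : Nat × Bool) ≠ normal then (1:Int) * (i:Int) else 0) else 0)
        + ∑ i ∈ Finset.Ico 1 (1 + ((pvFlipAt g si sj).length - 1)),
          if pvOkH (pvFlipAt g si sj) (pvFlipAt g si sj).length
              ((pvFlipAt g si sj).headD []).length i = true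
          then (if ((i, false) : Nat × Bool) ≠ normal then (100:Int) * (i:Int) else 0) else 0 := by
  rw [show pvFind (pvFlipAt g si sj)
      = ((List.range' 1 (((pvFlipAt g si sj).headD []).length - 1)).filter
          (fun i => pvOkV (pvFlipAt g si sj) (pvFlipAt g si sj).length
            ((pvFlipAt g si sj).headD []).length i)).map (fun i => (i, true))
        ++ ((List.range' 1 ((pvFlipAt g si sj).length - 1)).filter
          (fun i => pvOkH (pvFlipAt g si sj) (pvFlipAt g si sj).length
            ((pvFlipAt g si sj).headD []).length i)).map (fun i => (i, false)) from rfl,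
    List.map_append, List.sum_append, List.map_map, List.map_map,
    sum_map_filter_eq, sum_map_filter_eq, sum_map_range'_eq, sum_map_range'_eq]
  rfl

-- A's inner loop for one flip: walk find(flipped grid)
def innerA (g : List (List Char)) (si sj : Nat) (acc : Int) : Int :=
  (pvFind (pvFlipAt g si sj)).foldl (fun ans t =>
    if t ≠ (pvFind g).headD (0, true)
    then ans + (if t.2 then 1 else 100) * (t.1 : Int) else ans) acc

-- B's `lines` and per-flip inner loops, as named terms (definitionally B's port body)
def linesB (g : List (List Char)) : List (Nat × Bool) :=
  ((List.range' 1 ((g.headD []).length - 1)).filter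
      (fun i => badA (pvCell g) (min i ((g.headD []).length - i)) g.length i == [])).map
      (fun i => (i, true))
    ++ ((List.range' 1 (g.length - 1)).filter
      (fun i => badA (fun k j => pvCell g j k) (min i (g.length - i))
        (g.headD []).length i == [])).map (fun i => (i, false))

def vOkB (g : List (List Char)) (si sj i : Nat) : Bool :=
  if i - min i ((g.headD []).length - i) ≤ sj
      ∧ sj < i + min i ((g.headD []).length - i) then
    if sj < i then
      badA (pvCell g) (min i ((g.headD []).length - i)) g.length i == [(i - 1 - sj, si)]
        && pvFlipChar (pvCell g si sj) == pvCell g si (i + (i - 1 - sj))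
    else
      badA (pvCell g) (min i ((g.headD []).length - i)) g.length i == [(sj - i, si)]
        && pvCell g si (i - 1 - (sj - i)) == pvFlipChar (pvCell g si sj)
  else badA (pvCell g) (min i ((g.headD []).length - i)) g.length i == []

def hOkB (g : List (List Char)) (si sj i : Nat) : Bool :=
  if i - min i (g.length - i) ≤ si ∧ si < i + min i (g.length - i) then
    if si < i then
      badA (fun k j => pvCell g j k) (min i (g.length - i)) (g.headD []).length i
          == [(i - 1 - si, sj)]
        && pvFlipChar (pvCell g si sj) == pvCell g (i + (i - 1 - si)) sj
    else
      badA (fun k j => pvCell g j k) (min i (g.length - i)) (g.headD []).length i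
          == [(si - i, sj)]
        && pvCell g (i - 1 - (si - i)) sj == pvFlipChar (pvCell g si sj)
  else badA (fun k j => pvCell g j k) (min i (g.length - i)) (g.headD []).length i == []

def innerB (g : List (List Char)) (si sj : Nat) (total : Int) : Int :=
  (List.range' 1 (g.length - 1)).foldl (fun total i =>
      if hOkB g si sj i ∧ ((i, false) : Nat × Bool) ≠ (linesB g).headD (0, true)
      then total + 100 * (i : Int) else total)
    ((List.range' 1 ((g.headD []).length - 1)).foldl (fun total i =>
      if vOkB g si sj i ∧ ((i, true) : Nat × Bool) ≠ (linesB g).headD (0, true)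
      then total + (i : Int) else total) total)

theorem innerB_eq (g : List (List Char)) (si sj : Nat)
    (hsi : si < g.length) (hsj : sj < (g.headD []).length)
    (hrows : ∀ r ∈ g, (g.headD []).length ≤ r.length) (acc : Int) :
    innerB g si sj acc = innerA g si sj acc := by
  have hrow : sj < (g.getD si []).length := by
    have hm : g.getD si [] ∈ g := by
      rw [List.getD_eq_getElem?_getD, List.getElem?_eq_getElem hsi]
      exact List.getElem_mem hsi
    exact lt_of_lt_of_le hsj (hrows _ hm)
  have hnormal : (linesB g).headD (0, true) = (pvFind g).headD (0, true) := by
    rw [show linesB g = pvFind g from lines_eq_pvFind g]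
  unfold innerB innerA
  rw [foldl_add_ite, foldl_add_ite, foldl_add_ite, sum_map_range'_eq, sum_map_range'_eq,
    findSum_eq g ((pvFind g).headD (0, true)) si sj,
    length_flipAt, headD_length_flipAt g si sj hrow, add_assoc]
  congr 1
  congr 1
  · refine Finset.sum_congr rfl (fun i hi => ?_)
    rw [Finset.mem_Ico] at hi
    have hiff : vOkB g si sj i = true
        ↔ pvOkV (pvFlipAt g si sj) g.length (g.headD []).length i = true := by
      rw [pvOkV_iff (pvFlipAt g si sj) g.length (g.headD []).length i (by omega) (by omega),
        pvCell_flipAt g si sj hrow]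
      exact condA_iff (pvCell g) g.length (g.headD []).length i si sj
        (by omega) (by omega) hsi
    by_cases hok : pvOkV (pvFlipAt g si sj) g.length (g.headD []).length i = true
    · rw [if_pos hok]
      by_cases hne : (((i, true) : Nat × Bool) ≠ (pvFind g).headD (0, true))
      · rw [if_pos ⟨hiff.2 hok, hnormal ▸ hne⟩, if_pos hne, one_mul]
      · rw [if_neg (fun h => hne (hnormal ▸ h.2)), if_neg hne]
    · rw [if_neg hok, if_neg (fun h => hok (hiff.1 h.1))]
  · refine Finset.sum_congr rfl (fun i hi => ?_)
    rw [Finset.mem_Ico] at hi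
    have hiff : hOkB g si sj i = true
        ↔ pvOkH (pvFlipAt g si sj) g.length (g.headD []).length i = true := by
      rw [pvOkH_iff (pvFlipAt g si sj) g.length (g.headD []).length i (by omega) (by omega),
        pvCell_flipAt g si sj hrow, updF_swap]
      exact condA_iff (fun k j => pvCell g j k) (g.headD []).length g.length i sj si
        (by omega) (by omega) hsj
    by_cases hok : pvOkH (pvFlipAt g si sj) g.length (g.headD []).length i = true
    · rw [if_pos hok]
      by_cases hne : (((i, false) : Nat × Bool) ≠ (pvFind g).headD (0, true))
      · rw [if_pos ⟨hiff.2 hok, hnormal ▸ hne⟩, if_pos hne]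
      · rw [if_neg (fun h => hne (hnormal ▸ h.2)), if_neg hne]
    · rw [if_neg hok, if_neg (fun h => hok (hiff.1 h.1))]

-- one grid block: the incremental per-line tests produce exactly A's flip-and-research total
theorem grid_eq (g : List (List Char))
    (hrows : ∀ r ∈ g, (g.headD []).length ≤ r.length) :
    pvGridSum g = pvAltGrid g := by
  rw [show pvGridSum g = (List.range g.length).foldl (fun ans si =>
        (List.range (g.headD []).length).foldl (fun ans sj => innerA g si sj ans) ans) 0
      from rfl,
    show pvAltGrid g = (List.range g.length).foldl (fun total si =>
        (List.range (g.headD []).length).foldl (fun total sj => innerB g si sj total) total) 0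
      from rfl]
  refine (PySem.List.foldl_congr_mem _ _ _ _ (fun acc si hsi => ?_)).symm
  refine PySem.List.foldl_congr_mem _ _ _ _ (fun acc2 sj hsj => ?_)
  rw [List.mem_range] at hsi hsj
  exact innerB_eq g si sj hsi hsj hrows acc2

-- ===== VERDICT (by name: the statement is the Claim_ definition above) =====
theorem part2_spec : Claim_equal_part2 := by
  intro data hdom hpre
  unfold Spec_part2 part2 part2_alt
  unfold Pre_part2 at hpre
  refine congrArg (fun x => PySem.Int.toStr (PySem.Int.floordiv x 2)) ?_
  refine PySem.List.foldl_congr_mem _ _ _ _ (fun acc sg hsg => ?_)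
  obtain ⟨-, hrows, -⟩ := hpre sg hsg
  rw [grid_eq (pvGridOf sg) hrows]
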